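-- pv_equiv track=rewrite | github.com/juliarvalenti/tiny-teams-with-tokens | backend/ttt/pipeline/agent_core.py | _normalize_repo_slug
-- ===== SOURCE A (Python) =====
-- def _normalize_repo_slug(repo: str) -> str | None:
--     """`https://github.com/foo/bar.git` → `foo/bar`. None on garbage input."""
--     s = repo.strip().rstrip("/")
--     for prefix in ("https://github.com/", "github.com/"):
--         if s.startswith(prefix):
--             s = s[len(prefix) :]
--     if s.endswith(".git"):
--         s = s[: -len(".git")]
--     parts = s.split("/")
--     if len(parts) < 2 or not parts[0] or not parts[1]:
--         return None
--     return f"{parts[0]}/{parts[1]}"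
-- ===== SOURCE B (Python) =====
-- def _normalize_repo_slug(repo: str) -> str | None:
--     """`https://github.com/foo/bar.git` → `foo/bar`. None on garbage input."""
--     segs = repo.strip().split("/")
--     while segs and not segs[-1]:          # trailing slashes become trailing empty segments
--         segs.pop()
--     if segs[:3] == ["https:", "", "github.com"]:
--         segs = segs[3:]
--     if segs[:1] == ["github.com"]:
--         segs = segs[1:]
--     if segs and segs[-1].endswith(".git"):
--         segs[-1] = segs[-1][:-4]
--     if len(segs) < 2 or not segs[0] or not segs[1]:
--         return None
--     return f"{segs[0]}/{segs[1]}"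
-- ===== Notes on version B (the rewrite author's own statement) =====
-- stated objective: alternative
-- what changed: B splits the string into path segments first and does all normalization on the segment list (pop trailing empty segments, drop the literal ['https:','','github.com'] / ['github.com'] prefix segments, trim '.git' off the last segment), where A performs string surgery (rstrip, startswith with slicing, endswith with slicing) and only splits at the end.
import Mathlib
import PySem

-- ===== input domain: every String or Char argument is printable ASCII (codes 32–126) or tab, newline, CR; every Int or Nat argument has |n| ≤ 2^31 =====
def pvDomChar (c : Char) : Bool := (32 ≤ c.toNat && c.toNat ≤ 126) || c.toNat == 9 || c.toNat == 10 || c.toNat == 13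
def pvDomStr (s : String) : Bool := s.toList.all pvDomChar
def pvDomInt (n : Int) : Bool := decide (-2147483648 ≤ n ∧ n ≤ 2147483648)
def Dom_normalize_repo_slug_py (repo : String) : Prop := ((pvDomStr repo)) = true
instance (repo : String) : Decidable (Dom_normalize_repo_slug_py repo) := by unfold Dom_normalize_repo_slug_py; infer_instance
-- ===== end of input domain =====

-- B re-parses the URL as a list of path segments (split first, then operate on the segment
-- list: pop trailing empties, drop literal prefix segments, trim '.git' off the last segment)
-- instead of A's string surgery (rstrip / startswith+slice / endswith+slice, split last);
-- equivalent on every input (A is total); objective: alternative.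

-- ===== PORT A =====
-- helper: exact port of Python's str.rstrip("/") (strip only '/' and only from the right)
def pyRstripSlash (cs : List Char) : List Char :=
  (cs.reverse.dropWhile (fun c => c == '/')).reverse

def normalize_repo_slug_py (repo : String) : Option String :=
  let s0 := pyRstripSlash (PySem.Chars.strip repo.toList)
  -- for prefix in (...): if s.startswith(prefix): s = s[len(prefix):]
  let s1 := ["https://github.com/".toList, "github.com/".toList].foldl
      (fun s p => if PySem.Chars.startswith s p then PySem.Chars.slice s (some (p.length : Int)) none else s) s0
  -- if s.endswith(".git"): s = s[:-len(".git")]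
  let s2 := if PySem.Chars.endswith s1 ".git".toList then PySem.Chars.slice s1 none (some (-4)) else s1
  let parts := PySem.Chars.splitOn s2 ['/']
  -- if len(parts) < 2 or not parts[0] or not parts[1]: return None
  match parts with
  | p0 :: p1 :: _ => if p0.isEmpty || p1.isEmpty then none else some (String.ofList (p0 ++ '/' :: p1))
  | _ => none

-- ===== PORT B =====
def normalize_repo_slug_py_alt (repo : String) : Option String :=
  -- segs = repo.strip().split("/")
  let segs0 := PySem.Chars.splitOn (PySem.Chars.strip repo.toList) ['/']
  -- while segs and not segs[-1]: segs.pop()   (trailing slashes are trailing empty segments)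
  let segs1 := (segs0.reverse.dropWhile List.isEmpty).reverse
  -- if segs[:3] == ["https:", "", "github.com"]: segs = segs[3:]
  let segs2 := if segs1.take 3 = ["https:".toList, [], "github.com".toList] then segs1.drop 3 else segs1
  -- if segs[:1] == ["github.com"]: segs = segs[1:]
  let segs3 := if segs2.take 1 = ["github.com".toList] then segs2.drop 1 else segs2
  -- if segs and segs[-1].endswith(".git"): segs[-1] = segs[-1][:-4]
  let segs4 := match segs3.getLast? with
    | some lst => if PySem.Chars.endswith lst ".git".toList
        then segs3.dropLast ++ [PySem.Chars.slice lst none (some (-4))]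
        else segs3
    | none => segs3
  -- if len(segs) < 2 or not segs[0] or not segs[1]: return None
  if segs4.length < 2 ∨ (segs4.getD 0 []).isEmpty ∨ (segs4.getD 1 []).isEmpty then none
  else some (String.ofList (segs4.getD 0 [] ++ '/' :: segs4.getD 1 []))

-- ===== PRECONDITION & SPEC =====
def Spec_normalize_repo_slug_py (repo : String) (out : Option String) : Prop := out = normalize_repo_slug_py_alt repo
instance (repo : String) (out : Option String) : Decidable (Spec_normalize_repo_slug_py repo out) := by unfold Spec_normalize_repo_slug_py; infer_instance

-- ===== CLAIM (what is proved, stated in full; the proofs are below) =====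
def Claim_equal_normalize_repo_slug_py : Prop := ∀ (repo : String), Dom_normalize_repo_slug_py repo → Spec_normalize_repo_slug_py repo (normalize_repo_slug_py repo)

-- ===== LEMMAS AND PROOFS =====

-- reference recursive form of splitOn with the single-char separator '/'
def splitAux : List Char → List Char → List (List Char)
  | [], cur => [cur.reverse]
  | c :: rest, cur => if c = '/' then cur.reverse :: splitAux rest [] else splitAux rest (c :: cur)

-- inverse of splitAux: join with '/'
def joinSl : List (List Char) → List Char
  | [] => []
  | [x] => x
  | x :: y :: xs => x ++ '/' :: joinSl (y :: xs)

-- named forms of the two ports' pipeline stages (proof-only; the ports are defeq to composites of these)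
def peelA (p s : List Char) : List Char :=
  if PySem.Chars.startswith s p then PySem.Chars.slice s (some (p.length : Int)) none else s

def gitA (s : List Char) : List Char :=
  if PySem.Chars.endswith s ".git".toList then PySem.Chars.slice s none (some (-4)) else s

def finAB (parts : List (List Char)) : Option String :=
  match parts with
  | p0 :: p1 :: _ => if p0.isEmpty || p1.isEmpty then none else some (String.ofList (p0 ++ '/' :: p1))
  | _ => none

def bfin (parts : List (List Char)) : Option String :=
  if parts.length < 2 ∨ (parts.getD 0 []).isEmpty ∨ (parts.getD 1 []).isEmpty then none
  else some (String.ofList (parts.getD 0 [] ++ '/' :: parts.getD 1 []))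

def popT (xs : List (List Char)) : List (List Char) := (xs.reverse.dropWhile List.isEmpty).reverse

def bp1 (segs : List (List Char)) : List (List Char) :=
  if segs.take 3 = ["https:".toList, [], "github.com".toList] then segs.drop 3 else segs

def bp2 (segs : List (List Char)) : List (List Char) :=
  if segs.take 1 = ["github.com".toList] then segs.drop 1 else segs

def bgit (segs : List (List Char)) : List (List Char) :=
  match segs.getLast? with
  | some lst => if PySem.Chars.endswith lst ".git".toList
      then segs.dropLast ++ [PySem.Chars.slice lst none (some (-4))]
      else segs
  | none => segs

theorem bfin_eq_finAB (parts : List (List Char)) : bfin parts = finAB parts := by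
  cases parts with
  | nil => simp [bfin, finAB]
  | cons p0 t =>
    cases t with
    | nil => simp [bfin, finAB]
    | cons p1 r =>
      by_cases h0 : p0.isEmpty <;> by_cases h1 : p1.isEmpty <;> simp [bfin, finAB, h0, h1]

theorem splitOn_go_eq_splitAux (fuel : Nat) (l cur : List Char) (acc : List (List Char))
    (h : l.length < fuel) :
    PySem.Chars.splitOn.go ['/'] fuel l cur acc = acc.reverse ++ splitAux l cur := by
  induction fuel generalizing l cur acc with
  | zero => omega
  | succ n ih =>
    cases l with
    | nil => simp [PySem.Chars.splitOn.go, splitAux]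
    | cons c rest =>
      by_cases hc : c = '/'
      · subst hc
        rw [show PySem.Chars.splitOn.go ['/'] (n+1) ('/' :: rest) cur acc
              = PySem.Chars.splitOn.go ['/'] n rest [] (cur.reverse :: acc) by
            simp [PySem.Chars.splitOn.go, List.isPrefixOf]]
        rw [ih rest [] (cur.reverse :: acc) (by simpa using h)]
        simp [splitAux]
      · rw [show PySem.Chars.splitOn.go ['/'] (n+1) (c :: rest) cur acc
              = PySem.Chars.splitOn.go ['/'] n rest (c :: cur) acc by
            simp [PySem.Chars.splitOn.go, List.isPrefixOf, Ne.symm hc]]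
        rw [ih rest (c :: cur) acc (by simpa using h)]
        simp [splitAux, hc]

theorem splitOn_eq_splitAux (l : List Char) :
    PySem.Chars.splitOn l ['/'] = splitAux l [] := by
  unfold PySem.Chars.splitOn
  simpa using splitOn_go_eq_splitAux (l.length + 1) l [] [] (by omega)

theorem splitAux_ne_nil (l cur : List Char) : splitAux l cur ≠ [] := by
  induction l generalizing cur with
  | nil => simp [splitAux]
  | cons c rest ih =>
    by_cases hc : c = '/' <;> simp [splitAux, hc] <;> exact ih _

theorem splitAux_append_slash (a b cur : List Char) :
    splitAux (a ++ '/' :: b) cur = splitAux a cur ++ splitAux b [] := by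
  induction a generalizing cur with
  | nil => simp [splitAux]
  | cons c rest ih =>
    by_cases hc : c = '/' <;> simp [splitAux, hc, ih]

theorem splitAux_no_slash (w cur : List Char) (h : '/' ∉ w) :
    splitAux w cur = [cur.reverse ++ w] := by
  induction w generalizing cur with
  | nil => simp [splitAux]
  | cons c rest ih =>
    have hc : c ≠ '/' := by rintro rfl; exact h (by simp)
    rw [show splitAux (c :: rest) cur = splitAux rest (c :: cur) by simp [splitAux, hc]]
    rw [ih (c :: cur) (fun hm => h (by simp [hm]))]
    simp

theorem joinSl_cons (a : List Char) (l : List (List Char)) (h : l ≠ []) :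
    joinSl (a :: l) = a ++ '/' :: joinSl l := by
  cases l with
  | nil => exact absurd rfl h
  | cons y ys => rfl

theorem joinSl_splitAux (l cur : List Char) : joinSl (splitAux l cur) = cur.reverse ++ l := by
  induction l generalizing cur with
  | nil => simp [splitAux, joinSl]
  | cons c rest ih =>
    by_cases hc : c = '/'
    · subst hc
      rw [show splitAux ('/' :: rest) cur = cur.reverse :: splitAux rest [] by simp [splitAux]]
      rw [joinSl_cons _ _ (splitAux_ne_nil _ _), ih []]
      simp
    · rw [show splitAux (c :: rest) cur = splitAux rest (c :: cur) by simp [splitAux, hc]]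
      rw [ih (c :: cur)]
      simp

theorem getLastD_ne_nil (l : List (List Char)) (h : l ≠ []) (d1 d2 : List Char) :
    l.getLastD d1 = l.getLastD d2 := by
  rw [List.getLastD_eq_getLast?, List.getLastD_eq_getLast?]
  cases hl : l.getLast? with
  | none => exact absurd (List.getLast?_eq_none_iff.mp hl) h
  | some x => rfl

theorem splitAux_append_no_slash (w : List Char) (hw : '/' ∉ w) (x cur : List Char) :
    splitAux (x ++ w) cur = (splitAux x cur).dropLast ++ [(splitAux x cur).getLastD [] ++ w] := by
  induction x generalizing cur with
  | nil =>
    rw [List.nil_append, splitAux_no_slash w cur hw]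
    simp [splitAux]
  | cons c rest ih =>
    by_cases hc : c = '/'
    · subst hc
      rw [show (('/' :: rest : List Char) ++ w) = '/' :: (rest ++ w) by rfl]
      rw [show splitAux ('/' :: (rest ++ w)) cur = cur.reverse :: splitAux (rest ++ w) [] by simp [splitAux]]
      rw [show splitAux ('/' :: rest) cur = cur.reverse :: splitAux rest [] by simp [splitAux]]
      rw [ih []]
      have hne := splitAux_ne_nil rest []
      rw [List.dropLast_cons_of_ne_nil hne, List.getLastD_cons]
      rw [List.getLastD_eq_getLast?, List.getLastD_eq_getLast?]
      cases hl : (splitAux rest []).getLast? with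
      | none => exact absurd (List.getLast?_eq_none_iff.mp hl) hne
      | some y => simp
    · rw [show ((c :: rest : List Char) ++ w) = c :: (rest ++ w) by rfl]
      rw [show splitAux (c :: (rest ++ w)) cur = splitAux (rest ++ w) (c :: cur) by simp [splitAux, hc]]
      rw [show splitAux (c :: rest) cur = splitAux rest (c :: cur) by simp [splitAux, hc]]
      exact ih (c :: cur)

theorem getLast?_cons_ne {α : Type} (a : α) (l : List α) (h : l ≠ []) :
    (a :: l).getLast? = l.getLast? := by
  cases l with
  | nil => exact absurd rfl h
  | cons y ys => exact List.getLast?_cons_cons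

theorem splitAux_getLast_ne_empty (l cur : List Char)
    (h1 : ∀ x, l.getLast? = some x → x ≠ '/') (h2 : l ≠ [] ∨ cur ≠ []) :
    (splitAux l cur).getLast? ≠ some [] := by
  induction l generalizing cur with
  | nil =>
    have hcur : cur ≠ [] := by
      rcases h2 with h | h
      · exact absurd rfl h
      · exact h
    simp [splitAux]
    exact fun h => hcur (by simpa using congrArg List.reverse h)
  | cons c rest ih =>
    cases rest with
    | nil =>
      have hc : c ≠ '/' := h1 c (by simp)
      rw [show splitAux [c] cur = splitAux [] (c :: cur) by simp [splitAux, hc]]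
      simp [splitAux]
    | cons c2 r2 =>
      have h1' : ∀ x, (c2 :: r2).getLast? = some x → x ≠ '/' := by
        intro x hx
        exact h1 x (by rw [List.getLast?_cons_cons]; exact hx)
      by_cases hc : c = '/'
      · subst hc
        rw [show splitAux ('/' :: c2 :: r2) cur = cur.reverse :: splitAux (c2 :: r2) [] by simp [splitAux]]
        rw [getLast?_cons_ne _ _ (splitAux_ne_nil _ _)]
        exact ih [] h1' (Or.inl (by simp))
      · rw [show splitAux (c :: c2 :: r2) cur = splitAux (c2 :: r2) (c :: cur) by simp [splitAux, hc]]
        exact ih (c :: cur) h1' (Or.inl (by simp))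

theorem getLastD_joinSl_suffix (parts : List (List Char)) (h : parts ≠ []) :
    parts.getLastD [] <:+ joinSl parts := by
  induction parts with
  | nil => exact absurd rfl h
  | cons a l ih =>
    cases l with
    | nil => simp [joinSl]
    | cons y ys =>
      rw [joinSl_cons _ _ (by simp), List.getLastD_cons, getLastD_ne_nil _ (by simp) a []]
      exact (ih (by simp)).trans ⟨a ++ ['/'], by simp⟩

-- rstrip("/") decomposition
theorem rstrip_decomp (u : List Char) :
    u = pyRstripSlash u ++ List.replicate (u.reverse.takeWhile (fun c => c == '/')).length '/' := by
  have htk : u.reverse.takeWhile (fun c => c == '/')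
      = List.replicate (u.reverse.takeWhile (fun c => c == '/')).length '/' := by
    apply List.eq_replicate_iff.mpr
    refine ⟨rfl, ?_⟩
    intro x hx
    simpa using List.mem_takeWhile_imp hx
  conv_lhs => rw [← u.reverse_reverse, ← List.takeWhile_append_dropWhile
    (p := fun c => c == '/') (l := u.reverse)]
  rw [List.reverse_append]
  unfold pyRstripSlash
  rw [htk, List.reverse_replicate, List.length_replicate]

theorem head?_dropWhile {α : Type} (p : α → Bool) (l : List α) (x : α)
    (h : (l.dropWhile p).head? = some x) : p x = false := by
  induction l with
  | nil => simp [List.dropWhile] at h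
  | cons a as ih =>
    rw [List.dropWhile_cons] at h
    by_cases hp : p a = true
    · rw [if_pos hp] at h; exact ih h
    · rw [if_neg hp] at h
      simp at h
      rw [← h]
      simpa using hp

theorem rstrip_getLast (u : List Char) :
    ∀ x, (pyRstripSlash u).getLast? = some x → x ≠ '/' := by
  intro x hx
  have hh : (pyRstripSlash u).reverse.head? = some x := by
    rw [List.head?_reverse]; exact hx
  unfold pyRstripSlash at hh
  rw [List.reverse_reverse] at hh
  have := head?_dropWhile _ _ _ hh
  simpa using this

theorem splitAux_replicate (k : Nat) (cur : List Char) :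
    splitAux (List.replicate k '/') cur = cur.reverse :: List.replicate k [] := by
  induction k generalizing cur with
  | zero => simp [splitAux]
  | succ n ih =>
    rw [List.replicate_succ]
    rw [show splitAux ('/' :: List.replicate n '/') cur = cur.reverse :: splitAux (List.replicate n '/') [] by simp [splitAux]]
    rw [ih []]
    simp [List.replicate_succ]

theorem dropWhile_replicate_empty (k : Nat) (z : List (List Char)) :
    (List.replicate k ([] : List Char) ++ z).dropWhile List.isEmpty = z.dropWhile List.isEmpty := by
  induction k with
  | zero => simp
  | succ n ih => rw [List.replicate_succ]; simpa using ih

theorem popT_splitAux (u : List Char) :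
    popT (splitAux u []) =
      if pyRstripSlash u = [] then [] else splitAux (pyRstripSlash u) [] := by
  set r := pyRstripSlash u with hr
  set k := (u.reverse.takeWhile (fun c => c == '/')).length with hk
  have hu : u = r ++ List.replicate k '/' := rstrip_decomp u
  have hsplit : splitAux u [] = splitAux r [] ++ List.replicate k [] := by
    rw [hu]
    cases k with
    | zero => simp
    | succ n =>
      rw [List.replicate_succ, splitAux_append_slash, splitAux_replicate]
      simp [List.replicate_succ]
  rw [hsplit]
  unfold popT
  rw [List.reverse_append, List.reverse_replicate, dropWhile_replicate_empty]
  by_cases hrn : r = []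
  · rw [if_pos hrn, hrn]
    simp [splitAux, List.dropWhile]
  · rw [if_neg hrn]
    have hlast : (splitAux r []).getLast? ≠ some [] :=
      splitAux_getLast_ne_empty r [] (rstrip_getLast u) (Or.inl hrn)
    have hne := splitAux_ne_nil r []
    have hh : ∃ y, (splitAux r []).reverse.head? = some y ∧ y ≠ [] := by
      cases hl : (splitAux r []).getLast? with
      | none => exact absurd (List.getLast?_eq_none_iff.mp hl) hne
      | some y =>
        refine ⟨y, ?_, fun hy => hlast (by rw [hl, hy])⟩
        rw [List.head?_reverse]; exact hl
    obtain ⟨y, hy1, hy2⟩ := hh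
    cases hrev : (splitAux r []).reverse with
    | nil => rw [hrev] at hy1; simp at hy1
    | cons a as =>
      rw [hrev] at hy1
      simp at hy1
      rw [List.dropWhile_cons, if_neg (by rw [← hy1] at hy2; simpa using hy2)]
      rw [← hrev, List.reverse_reverse]

-- stage bridges: A's slice forms as drop/take
theorem peelA_eq (p s : List Char) :
    peelA p s = if PySem.Chars.startswith s p then s.drop p.length else s := by
  unfold peelA
  rw [PySem.Chars.slice_eq_listSlice, PySem.List.slice_from_natCast]

theorem gitA_eq (s : List Char) :
    gitA s = if PySem.Chars.endswith s ".git".toList then s.take (s.length - 4) else s := by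
  unfold gitA
  cases he : PySem.Chars.endswith s ".git".toList
  · rfl
  · rw [if_pos rfl, if_pos rfl, PySem.Chars.slice_eq_listSlice,
        PySem.List.slice_to_neg_ofNat s 4 (by omega)]

theorem dropLast_concat_getLastD (l : List (List Char)) (h : l ≠ []) (d : List Char) :
    l.dropLast ++ [l.getLastD d] = l := by
  rw [getLastD_ne_nil l h d (l.getLast h), List.getLastD_eq_getLast? ,
      List.getLast?_eq_getLast_of_ne_nil h]
  simpa using List.dropLast_append_getLast h

theorem bgit_concat (xs : List (List Char)) (lst : List Char) :
    bgit (xs ++ [lst]) = if PySem.Chars.endswith lst ".git".toList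
      then xs ++ [PySem.Chars.slice lst none (some (-4))] else xs ++ [lst] := by
  simp only [bgit, List.getLast?_concat, List.dropLast_concat]

-- the '.git' stage commutes with splitting
theorem gitStage (s : List Char) : splitAux (gitA s) [] = bgit (splitAux s []) := by
  rw [gitA_eq]
  by_cases hg : PySem.Chars.endswith s ".git".toList = true
  · rw [if_pos hg]
    obtain ⟨w, hw⟩ : ∃ w, s = w ++ ".git".toList := by
      obtain ⟨w, hw⟩ := (PySem.Chars.endswith_iff _ _).mp hg
      exact ⟨w, hw.symm⟩
    subst hw
    rw [show (w ++ ".git".toList).length - 4 = w.length by simp]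
    rw [List.take_left]
    rw [splitAux_append_no_slash ".git".toList (by decide) w []]
    rw [bgit_concat]
    rw [if_pos ((PySem.Chars.endswith_iff _ _).mpr ⟨(splitAux w []).getLastD [], rfl⟩)]
    rw [PySem.Chars.slice_eq_listSlice, PySem.List.slice_to_neg_ofNat _ 4 (by omega)]
    rw [show ((splitAux w []).getLastD [] ++ ".git".toList).length - 4
          = ((splitAux w []).getLastD []).length by simp]
    rw [List.take_left]
    exact (dropLast_concat_getLastD _ (splitAux_ne_nil _ _) _).symm
  · rw [if_neg hg]
    unfold bgit
    cases hl : (splitAux s []).getLast? with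
    | none => rfl
    | some lst =>
      have h1 : lst <:+ s := by
        have hj := joinSl_splitAux s []
        simp at hj
        have := getLastD_joinSl_suffix (splitAux s []) (splitAux_ne_nil _ _)
        rw [hj] at this
        rwa [List.getLastD_eq_getLast?, hl] at this
      have hcond : ¬ PySem.Chars.endswith lst ['.', 'g', 'i', 't'] = true := fun hend =>
        hg ((PySem.Chars.endswith_iff _ _).mpr (((PySem.Chars.endswith_iff _ _).mp hend).trans h1))
      simp [hcond]

-- the 'github.com/' stage
theorem stage2 (s : List Char) :
    finAB (splitAux (gitA (peelA "github.com/".toList s)) []) =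
      finAB (bgit (bp2 (splitAux s []))) := by
  by_cases h2 : PySem.Chars.startswith s "github.com/".toList = true
  · obtain ⟨t, ht⟩ := (PySem.Chars.startswith_iff _ _).mp h2
    subst ht
    rw [peelA_eq, if_pos h2, List.drop_left]
    have hsp : splitAux ("github.com/".toList ++ t) [] = "github.com".toList :: splitAux t [] := by
      rw [show ("github.com/".toList ++ t) = "github.com".toList ++ '/' :: t from rfl]
      rw [splitAux_append_slash, splitAux_no_slash "github.com".toList [] (by decide)]
      rfl
    rw [hsp]
    unfold bp2
    have hc : List.take 1 ("github.com".toList :: splitAux t []) = ["github.com".toList] := rfl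
    rw [if_pos hc]
    rw [show List.drop 1 ("github.com".toList :: splitAux t []) = splitAux t [] from rfl]
    exact congrArg finAB (gitStage t)
  · by_cases hb : (splitAux s []).take 1 = ["github.com".toList]
    · cases hd : (splitAux s []).drop 1 with
      | nil =>
        have hsplit : splitAux s [] = ["github.com".toList] := by
          rw [← List.take_append_drop 1 (splitAux s []), hb, hd]
          simp
        have hs : s = "github.com".toList := by
          have hj := joinSl_splitAux s []
          rw [hsplit] at hj
          simpa [joinSl] using hj.symm
        rw [hs]
        decide
      | cons d ds =>
        exfalso
        apply h2
        apply (PySem.Chars.startswith_iff _ _).mpr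
        have hsplit : splitAux s [] = "github.com".toList :: d :: ds := by
          rw [← List.take_append_drop 1 (splitAux s []), hb, hd]
          rfl
        have hj := joinSl_splitAux s []
        rw [hsplit] at hj
        rw [joinSl_cons _ _ (by simp)] at hj
        simp at hj
        exact ⟨joinSl (d :: ds), by rw [← hj]; rfl⟩
    · rw [peelA_eq, if_neg h2]
      unfold bp2
      rw [if_neg hb]
      exact congrArg finAB (gitStage s)

-- the 'https://github.com/' stage
theorem stage1 (s : List Char) :
    finAB (splitAux (gitA (peelA "github.com/".toList (peelA "https://github.com/".toList s))) []) =
      finAB (bgit (bp2 (bp1 (splitAux s [])))) := by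
  by_cases h1 : PySem.Chars.startswith s "https://github.com/".toList = true
  · obtain ⟨t, ht⟩ := (PySem.Chars.startswith_iff _ _).mp h1
    subst ht
    rw [peelA_eq (p := "https://github.com/".toList), if_pos h1, List.drop_left]
    have hsp : splitAux ("https://github.com/".toList ++ t) []
        = "https:".toList :: [] :: "github.com".toList :: splitAux t [] := by
      rw [show ("https://github.com/".toList ++ t)
            = "https:".toList ++ '/' :: ('/' :: ("github.com".toList ++ '/' :: t)) from rfl]
      rw [splitAux_append_slash, splitAux_no_slash "https:".toList [] (by decide)]
      rw [show splitAux ('/' :: ("github.com".toList ++ '/' :: t)) []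
            = [] :: splitAux ("github.com".toList ++ '/' :: t) [] by simp [splitAux]]
      rw [splitAux_append_slash, splitAux_no_slash "github.com".toList [] (by decide)]
      rfl
    rw [hsp]
    unfold bp1
    have hc : List.take 3 ("https:".toList :: [] :: "github.com".toList :: splitAux t [])
        = ["https:".toList, [], "github.com".toList] := rfl
    rw [if_pos hc]
    rw [show List.drop 3 ("https:".toList :: [] :: "github.com".toList :: splitAux t []) = splitAux t [] from rfl]
    exact stage2 t
  · by_cases hb : (splitAux s []).take 3 = ["https:".toList, [], "github.com".toList]
    · cases hd : (splitAux s []).drop 3 with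
      | nil =>
        have hsplit : splitAux s [] = ["https:".toList, [], "github.com".toList] := by
          rw [← List.take_append_drop 3 (splitAux s []), hb, hd]
          simp
        have hs : s = "https://github.com".toList := by
          have hj := joinSl_splitAux s []
          rw [hsplit] at hj
          simpa [joinSl] using hj.symm
        rw [hs]
        decide
      | cons d ds =>
        exfalso
        apply h1
        apply (PySem.Chars.startswith_iff _ _).mpr
        have hsplit : splitAux s [] = "https:".toList :: [] :: "github.com".toList :: d :: ds := by
          rw [← List.take_append_drop 3 (splitAux s []), hb, hd]
          rfl
        have hj := joinSl_splitAux s []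
        rw [hsplit] at hj
        rw [joinSl_cons _ _ (by simp), joinSl_cons _ _ (by simp), joinSl_cons _ _ (by simp)] at hj
        simp at hj
        exact ⟨joinSl (d :: ds), by rw [← hj]; rfl⟩
    · rw [peelA_eq (p := "https://github.com/".toList), if_neg h1]
      unfold bp1
      rw [if_neg hb]
      exact stage2 s

set_option maxHeartbeats 2000000 in
theorem pvEqAB (repo : String) :
    normalize_repo_slug_py repo = normalize_repo_slug_py_alt repo := by
  unfold normalize_repo_slug_py normalize_repo_slug_py_alt
  simp only [splitOn_eq_splitAux, List.foldl_cons, List.foldl_nil]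
  show finAB (splitAux (gitA (peelA "github.com/".toList
        (peelA "https://github.com/".toList (pyRstripSlash (PySem.Chars.strip repo.toList))))) [])
      = bfin (bgit (bp2 (bp1 (popT (splitAux (PySem.Chars.strip repo.toList) [])))))
  rw [bfin_eq_finAB, popT_splitAux]
  by_cases hr : pyRstripSlash (PySem.Chars.strip repo.toList) = []
  · rw [if_pos hr, hr]
    decide
  · rw [if_neg hr]
    exact stage1 _

-- ===== VERDICT (by name: the statement is the Claim_ definition above) =====
theorem normalize_repo_slug_py_spec : Claim_equal_normalize_repo_slug_py := by
  intro repo _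
  unfold Spec_normalize_repo_slug_py
  exact pvEqAB repo
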